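-- pv_equiv track=rewrite | github.com/hugo17051989/Bai-tap-Python | homework/bai71.py | demsotu
-- ===== SOURCE A (Python) =====
-- def demsotu(s):
--     kq = 0
--     a = s.split()
--     for c in a:
--         checkso=False
--         checkkytu=False
--         for i in c:
--             if i.isalpha():
--                 checkkytu = True
--             if i.isdigit():
--                 checkso = True
--         if checkkytu and checkso:
--             kq +=1
--     return kq
-- ===== SOURCE B (Python) =====
-- def demsotu(s):
--     # Single pass over the characters, no word list: a small state machine
--     # tracks whether the current run between whitespace has a letter / a digit.
--     total = 0
--     ha = hd = False
--     for ch in s: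
--         if ch.isspace():
--             if ha and hd:
--                 total += 1
--             ha = hd = False
--         else:
--             ha = ha or ch.isalpha()
--             hd = hd or ch.isdigit()
--     return total + (1 if ha and hd else 0)
-- ===== Notes on version B (the rewrite author's own statement) =====
-- stated objective: alternative
-- what changed: A splits the string into a word list and runs an inner flag loop per word; B never builds the word list: it is a single character-level state machine over the raw string that flushes a counter at each whitespace boundary.
import Mathlib
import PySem

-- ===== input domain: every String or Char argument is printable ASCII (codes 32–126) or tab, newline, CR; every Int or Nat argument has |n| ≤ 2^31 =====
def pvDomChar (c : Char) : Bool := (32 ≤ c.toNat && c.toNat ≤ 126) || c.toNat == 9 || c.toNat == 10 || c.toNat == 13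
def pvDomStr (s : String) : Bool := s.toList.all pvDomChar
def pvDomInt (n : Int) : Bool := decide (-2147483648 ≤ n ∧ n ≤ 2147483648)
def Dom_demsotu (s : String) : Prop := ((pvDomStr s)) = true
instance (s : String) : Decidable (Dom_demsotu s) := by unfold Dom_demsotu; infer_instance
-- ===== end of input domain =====

-- B drops A's split-into-word-list + per-word flag loop for a single character-level
-- state machine over the raw string (alternative decomposition, same cost).


-- ===== PORT A =====
-- a = s.split(); for c in a: inner flag loop over chars; count words with both flags
def demsotu (s : String) : Int :=
  (PySem.Str.split₀ s).foldl (fun kq c =>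
    let flags : Bool × Bool :=
      c.toList.foldl (fun (p : Bool × Bool) i =>
        let checkkytu := if PySem.Chars.isalpha i then true else p.1
        let checkso := if PySem.Chars.isdigit i then true else p.2
        (checkkytu, checkso)) (false, false)
    if flags.1 && flags.2 then kq + 1 else kq) 0

-- ===== PORT B =====
-- single pass over the characters: state (total, has_alpha, has_digit), flush at whitespace
def demsotu_alt (s : String) : Int :=
  let st := s.toList.foldl (fun (p : Int × Bool × Bool) ch =>
    if PySem.Chars.isspace ch then
      (p.1 + (if p.2.1 && p.2.2 then 1 else 0), false, false)
    else
      (p.1, p.2.1 || PySem.Chars.isalpha ch, p.2.2 || PySem.Chars.isdigit ch))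
    (0, false, false)
  st.1 + (if st.2.1 && st.2.2 then 1 else 0)

-- ===== PRECONDITION & SPEC =====
def Spec_demsotu (s : String) (out : Int) : Prop := out = demsotu_alt s
instance (s : String) (out : Int) : Decidable (Spec_demsotu s out) := by unfold Spec_demsotu; infer_instance

-- ===== CLAIM (what is proved, stated in full; the proofs are below) =====
def Claim_equal_demsotu : Prop := ∀ (s : String), Dom_demsotu s → Spec_demsotu s (demsotu s)

-- ===== LEMMAS AND PROOFS =====

-- a word is "good" when it has a letter and a digit
def pvGood (w : List Char) : Bool :=
  w.any PySem.Chars.isalpha && w.any PySem.Chars.isdigit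

def pvGcount (ws : List (List Char)) : Int := ((ws.filter pvGood).length : Int)

-- A's inner flag loop computes (any isalpha, any isdigit), for any starting flags
theorem demsotu_flags (l : List Char) (b1 b2 : Bool) :
    l.foldl (fun (p : Bool × Bool) i =>
        (if PySem.Chars.isalpha i then true else p.1,
         if PySem.Chars.isdigit i then true else p.2)) (b1, b2)
      = (b1 || l.any PySem.Chars.isalpha, b2 || l.any PySem.Chars.isdigit) := by
  induction l generalizing b1 b2 with
  | nil => simp
  | cons c t ih =>
    simp only [List.foldl_cons, List.any_cons, ih]
    by_cases h1 : PySem.Chars.isalpha c <;> by_cases h2 : PySem.Chars.isdigit c <;>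
      simp [h1, h2]

-- A's outer counting loop is the good-word count, for any starting count
theorem demsotu_count (ws : List String) (k : Int) :
    ws.foldl (fun kq c =>
        if pvGood c.toList then kq + 1 else kq) k
      = k + pvGcount (ws.map String.toList) := by
  induction ws generalizing k with
  | nil => simp [pvGcount]
  | cons w t ih =>
    simp only [List.foldl_cons, List.map_cons, pvGcount, List.filter_cons]
    by_cases h : pvGood w.toList = true
    · rw [if_pos h, if_pos h, ih]; simp [pvGcount]; omega
    · rw [if_neg h, if_neg h, ih]; simp [pvGcount]

-- the accumulator of split₀.go is a reversed prefix of the output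
theorem split₀_go_acc (l : List Char) (cur : List Char) (acc : List (List Char)) :
    PySem.Chars.split₀.go l cur acc
      = acc.reverse ++ PySem.Chars.split₀.go l cur [] := by
  induction l generalizing cur acc with
  | nil =>
    simp only [PySem.Chars.split₀.go]
    by_cases h : cur.isEmpty = true <;> simp [h]
  | cons c rest ih =>
    simp only [PySem.Chars.split₀.go]
    by_cases hs : PySem.Chars.isspace c = true
    · by_cases he : cur.isEmpty = true
      · simp only [hs, he, if_pos]
        exact ih [] acc
      · simp only [hs, he, if_true, if_neg, Bool.false_eq_true, not_false_iff]
        rw [ih [] (cur.reverse :: acc), ih [] [cur.reverse]]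
        simp
    · simp only [hs, if_neg, Bool.false_eq_true, not_false_iff]
      exact ih (c :: cur) acc

-- B's state machine counts the good words produced by split₀.go
theorem demsotu_alt_go (l : List Char) (cur : List Char) (k : Int) :
    (let st := l.foldl (fun (p : Int × Bool × Bool) ch =>
        if PySem.Chars.isspace ch then
          (p.1 + (if p.2.1 && p.2.2 then 1 else 0), false, false)
        else
          (p.1, p.2.1 || PySem.Chars.isalpha ch, p.2.2 || PySem.Chars.isdigit ch))
        (k, cur.any PySem.Chars.isalpha, cur.any PySem.Chars.isdigit)
     st.1 + (if st.2.1 && st.2.2 then 1 else 0))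
      = k + pvGcount (PySem.Chars.split₀.go l cur []) := by
  induction l generalizing cur k with
  | nil =>
    simp only [List.foldl_nil, PySem.Chars.split₀.go]
    by_cases he : cur.isEmpty = true
    · rcases List.isEmpty_iff.mp he with rfl
      simp [pvGcount]
    · have : cur ≠ [] := fun h => he (List.isEmpty_iff.mpr h)
      simp only [if_neg he]
      by_cases hg : pvGood cur.reverse = true
      · have hb := hg
        simp only [pvGood, List.any_reverse, Bool.and_eq_true] at hb
        simp [hb.1, hb.2, pvGcount, hg]
      · have hng : ¬(cur.any PySem.Chars.isalpha && cur.any PySem.Chars.isdigit) = true :=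
          fun h => hg (by simpa [pvGood, List.any_reverse] using h)
        simp only [hng, pvGcount]
        simp
        exact Bool.not_eq_true _ ▸ hg
  | cons c rest ih =>
    simp only [List.foldl_cons, PySem.Chars.split₀.go]
    by_cases hs : PySem.Chars.isspace c = true
    · simp only [hs, if_true]
      by_cases he : cur.isEmpty = true
      · rcases List.isEmpty_iff.mp he with rfl
        simp only [List.any_nil, Bool.and_false, if_neg, Bool.false_eq_true,
          not_false_iff, add_zero]
        have := ih ([] : List Char) k
        simpa using this
      · simp only [if_neg he]
        rw [split₀_go_acc rest [] [cur.reverse]]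
        have := ih ([] : List Char)
          (k + (if cur.any PySem.Chars.isalpha && cur.any PySem.Chars.isdigit then 1 else 0))
        simp only [List.any_nil] at this
        refine this.trans ?_
        simp only [pvGcount, List.reverse_cons, List.reverse_nil, List.nil_append,
          List.singleton_append, List.filter_cons]
        by_cases hg : pvGood cur.reverse = true
        · have hb := hg
          simp only [pvGood, List.any_reverse, Bool.and_eq_true] at hb
          have hand : (cur.any PySem.Chars.isalpha && cur.any PySem.Chars.isdigit) = true := by
            simp [hb.1, hb.2]
          simp [hand, hg]; omega
        · have hand : ¬(cur.any PySem.Chars.isalpha && cur.any PySem.Chars.isdigit) = true :=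
            fun h => hg (by simpa [pvGood, List.any_reverse] using h)
          simp [hand, hg]
    · simp only [hs, if_neg, Bool.false_eq_true, not_false_iff]
      have h := ih (c :: cur) k
      simp only [List.any_cons] at h
      rw [Bool.or_comm (List.any cur PySem.Chars.isalpha) (PySem.Chars.isalpha c),
          Bool.or_comm (List.any cur PySem.Chars.isdigit) (PySem.Chars.isdigit c)]
      exact h

-- ===== VERDICT (by name: the statement is the Claim_ definition above) =====
theorem demsotu_spec : Claim_equal_demsotu := by
  intro s _
  unfold Spec_demsotu demsotu
  simp only [demsotu_alt]
  -- A's side: the flag loop is pvGood, the counting loop is pvGcount of the split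
  have hA :
      (PySem.Str.split₀ s).foldl (fun kq c =>
        let flags : Bool × Bool :=
          c.toList.foldl (fun (p : Bool × Bool) i =>
            let checkkytu := if PySem.Chars.isalpha i then true else p.1
            let checkso := if PySem.Chars.isdigit i then true else p.2
            (checkkytu, checkso)) (false, false)
        if flags.1 && flags.2 then kq + 1 else kq) 0
      = pvGcount (PySem.Chars.split₀ s.toList) := by
    rw [← PySem.Str.split₀_map_toList]
    have : ∀ (ws : List String),
        ws.foldl (fun kq c =>
          let flags : Bool × Bool :=
            c.toList.foldl (fun (p : Bool × Bool) i =>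
              (if PySem.Chars.isalpha i then true else p.1,
               if PySem.Chars.isdigit i then true else p.2)) (false, false)
          if flags.1 && flags.2 then kq + 1 else kq) 0
        = pvGcount (ws.map String.toList) := by
      intro ws
      have heq : (fun (kq : Int) (c : String) =>
          let flags : Bool × Bool :=
            c.toList.foldl (fun (p : Bool × Bool) i =>
              (if PySem.Chars.isalpha i then true else p.1,
               if PySem.Chars.isdigit i then true else p.2)) (false, false)
          if flags.1 && flags.2 then kq + 1 else kq)
          = (fun kq c => if pvGood c.toList then kq + 1 else kq) := by
        funext kq c
        simp only [demsotu_flags, Bool.false_or, pvGood]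
        rfl
      rw [heq, demsotu_count]; simp
    exact this _
  rw [hA]
  -- B's side: the state machine counts good words of split₀
  have hB := demsotu_alt_go s.toList [] 0
  simp only [List.any_nil, zero_add] at hB
  exact hB.symm
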